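-- pv_equiv track=rewrite | github.com/wangbiu/lpmln_isets | lpmln/iset/SingleISetSEChecker.py | check_contain_semi_valid_rule
-- ===== SOURCE A (Python) =====
-- def get_oct_iset_id(iset_id, rule_number):
--     iset_id = oct(iset_id + 1)[2:]
--     diff = rule_number - len(iset_id)
--     iset_id = "0"*diff + iset_id
--     return iset_id
--
-- def check_contain_semi_valid_rule(iset_ids, rule_number):
--     flags = [0] * rule_number
--     for id in iset_ids:
--         id_bits = get_oct_iset_id(id, rule_number)
--         for i in range(rule_number):
--             if id_bits[i] == "4":
--                 flags[i] = 1
--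
--     if sum(flags) < rule_number:
--         return True
--     else:
--         return False
-- ===== SOURCE B (Python) =====
-- def get_oct_iset_id(iset_id, rule_number):
--     iset_id = oct(iset_id + 1)[2:]
--     diff = rule_number - len(iset_id)
--     iset_id = "0"*diff + iset_id
--     return iset_id
--
-- def check_contain_semi_valid_rule(iset_ids, rule_number):
--     # Column-wise scan over a precomputed table of octal strings, with early exit.
--     oct_ids = [get_oct_iset_id(id, rule_number) for id in iset_ids]
--     for i in range(rule_number):
--         if all(bits[i] != "4" for bits in oct_ids):
--             return True
--     return False
-- ===== Notes on version B (the rewrite author's own statement) =====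
-- stated objective: alternative
-- what changed: A accumulates a per-position flag array row by row over all ids and finally compares its sum to rule_number; B precomputes the octal strings once and scans column by column, returning True at the first position where no string has '4', with no flag array and an early exit.
import Mathlib
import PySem

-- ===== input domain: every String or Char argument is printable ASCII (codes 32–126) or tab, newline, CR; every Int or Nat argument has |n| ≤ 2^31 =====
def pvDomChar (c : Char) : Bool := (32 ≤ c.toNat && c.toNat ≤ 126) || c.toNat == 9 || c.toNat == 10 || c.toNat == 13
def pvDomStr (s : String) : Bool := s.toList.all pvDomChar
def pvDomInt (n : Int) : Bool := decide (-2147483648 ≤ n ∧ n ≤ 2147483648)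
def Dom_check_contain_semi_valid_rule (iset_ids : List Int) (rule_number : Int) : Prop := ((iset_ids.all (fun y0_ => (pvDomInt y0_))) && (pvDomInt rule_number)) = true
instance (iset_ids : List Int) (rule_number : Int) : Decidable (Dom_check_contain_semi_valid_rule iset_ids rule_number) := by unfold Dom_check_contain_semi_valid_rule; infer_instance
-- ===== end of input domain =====

-- ===== PORT A =====
-- B is an alternative of the same cost: column-wise scan over precomputed octal strings
-- instead of A's row-wise flag accumulation; equivalence of return values is proved.

-- shared same-module helper: oct(n)[2:] as a list of chars (exact for every Int;
-- for negative n Python's oct gives "-0o…" whose [2:] is "o…")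
def pyOctDrop2 (n : Int) : List Char :=
  if n < 0 then 'o' :: Nat.toDigits 8 (-n).toNat
  else Nat.toDigits 8 n.toNat

-- shared same-module helper get_oct_iset_id (both A and B call it)
def get_oct_iset_id (iset_id : Int) (rule_number : Int) : List Char :=
  let s := pyOctDrop2 (iset_id + 1)
  let diff : Int := rule_number - (s.length : Int)
  List.replicate diff.toNat '0' ++ s

-- a Python list is array-backed (O(1) indexing / in-place update), so the flag list and
-- the indexed string are represented by Array; the loop over range(rule_number) and every
-- intermediate value are A's own, step for step
def check_contain_semi_valid_rule (iset_ids : List Int) (rule_number : Int) : Bool :=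
  let flags : Array Int := Array.replicate rule_number.toNat 0
  let flags := iset_ids.foldl (fun flags id =>
    let id_bits := (get_oct_iset_id id rule_number).toArray
    (List.range rule_number.toNat).foldl (fun (flags : Array Int) k =>
      if id_bits.getD k ' ' = '4' then flags.setIfInBounds k 1 else flags) flags) flags
  decide (flags.foldl (· + ·) 0 < rule_number)

-- ===== PORT B =====
def check_contain_semi_valid_rule_alt (iset_ids : List Int) (rule_number : Int) : Bool :=
  let oct_ids := iset_ids.map (fun id => get_oct_iset_id id rule_number)
  (PySem.List.pyRange 0 rule_number 1).any (fun i =>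
    oct_ids.all (fun bits => PySem.List.pyGetD bits i ' ' ≠ '4'))

-- ===== PRECONDITION & SPEC =====
def Spec_check_contain_semi_valid_rule (iset_ids : List Int) (rule_number : Int) (out : Bool) : Prop := out = check_contain_semi_valid_rule_alt iset_ids rule_number
instance (iset_ids : List Int) (rule_number : Int) (out : Bool) : Decidable (Spec_check_contain_semi_valid_rule iset_ids rule_number out) := by unfold Spec_check_contain_semi_valid_rule; infer_instance

-- ===== CLAIM (what is proved, stated in full; the proofs are below) =====
def Claim_equal_check_contain_semi_valid_rule : Prop := ∀ (iset_ids : List Int) (rule_number : Int), Dom_check_contain_semi_valid_rule iset_ids rule_number → Spec_check_contain_semi_valid_rule iset_ids rule_number (check_contain_semi_valid_rule iset_ids rule_number)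

-- ===== LEMMAS AND PROOFS =====

-- Bool form of "this octal string has digit '4' at position j" (kept opaque to simp)
def hit4 (bits : List Char) (j : Nat) : Bool := bits.getD j ' ' == '4'

-- the inner scan of A, on Nat indices
def innerStep (bits : List Char) (fl : List Int) (k : Nat) : List Int :=
  if hit4 bits k then fl.set k 1 else fl

lemma mapIdx_mapIdx {α : Type} (l : List α) (f g : Nat → α → α) :
    (l.mapIdx f).mapIdx g = l.mapIdx (fun j v => g j (f j v)) := by
  apply List.ext_getElem <;> simp

lemma mapIdx_id {α : Type} (l : List α) : l.mapIdx (fun _ v => v) = l := by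
  apply List.ext_getElem <;> simp

lemma inner_eq (bits : List Char) (fl : List Int) (m : Nat) :
    (List.range m).foldl (innerStep bits) fl
      = fl.mapIdx (fun j v => if j < m ∧ hit4 bits j = true then 1 else v) := by
  induction m with
  | zero =>
      simp only [List.range_zero, List.foldl_nil]
      rw [show (fun (j : Nat) (v : Int) => if j < 0 ∧ hit4 bits j = true then 1 else v)
            = fun _ v => v by funext j v; simp]
      rw [mapIdx_id]
  | succ m ih =>
      rw [List.range_succ, List.foldl_append, ih]
      simp only [List.foldl_cons, List.foldl_nil, innerStep]
      by_cases h4 : hit4 bits m = true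
      · rw [if_pos h4]
        apply List.ext_getElem
        · simp
        · intro j h1 h2
          simp only [List.getElem_set, List.getElem_mapIdx]
          by_cases hj : j = m
          · subst hj
            rw [if_pos rfl, if_pos ⟨Nat.lt_succ_self _, h4⟩]
          · rw [if_neg (fun h => hj h.symm)]
            have hiff : (j < m ∧ hit4 bits j = true) ↔ (j < m + 1 ∧ hit4 bits j = true) := by
              constructor
              · rintro ⟨a, b⟩; exact ⟨by omega, b⟩
              · rintro ⟨a, b⟩; exact ⟨by omega, b⟩
            rw [if_congr hiff rfl rfl]
      · rw [if_neg h4]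
        apply List.ext_getElem
        · simp
        · intro j h1 h2
          simp only [List.getElem_mapIdx]
          have hiff : (j < m ∧ hit4 bits j = true) ↔ (j < m + 1 ∧ hit4 bits j = true) := by
            constructor
            · rintro ⟨a, b⟩; exact ⟨by omega, b⟩
            · rintro ⟨a, b⟩
              refine ⟨?_, b⟩
              rcases Nat.lt_succ_iff_lt_or_eq.mp a with h | h
              · exact h
              · subst h; exact absurd b h4
          rw [if_congr hiff rfl rfl]

lemma outer_eq (rn : Int) (ids : List Int) (fl : List Int) :
    ids.foldl (fun fl id =>
        (List.range rn.toNat).foldl (innerStep (get_oct_iset_id id rn)) fl) fl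
      = fl.mapIdx (fun j v =>
          if (ids.any (fun id =>
                decide (j < rn.toNat) && hit4 (get_oct_iset_id id rn) j)) = true
          then 1 else v) := by
  induction ids generalizing fl with
  | nil =>
      simp only [List.foldl_nil, List.any_nil]
      simp [mapIdx_id]
  | cons id rest ih =>
      simp only [List.foldl_cons]
      rw [inner_eq, ih, mapIdx_mapIdx]
      congr 1
      funext j v
      simp only [List.any_cons, Bool.or_eq_true, Bool.and_eq_true, decide_eq_true_eq]
      split_ifs <;> tauto

lemma sum_flags (rn : Int) (Q : Nat → Bool) :
    (((List.range rn.toNat).map (fun j => if Q j = true then (1 : Int) else 0)).sum < rn)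
      ↔ ∃ j, j < rn.toNat ∧ Q j = false := by
  rw [PySem.List.sum_map_ite_one_zero]
  constructor
  · intro h
    by_contra hc
    push Not at hc
    have hall : ∀ j ∈ List.range rn.toNat, Q j = true := by
      intro j hj
      exact Bool.ne_false_iff.mp (hc j (List.mem_range.mp hj))
    rw [List.countP_eq_length.mpr hall, List.length_range] at h
    omega
  · rintro ⟨j, hj, hQ⟩
    have hlen : (List.range rn.toNat).countP Q ≤ rn.toNat := by
      have := List.countP_le_length (p := Q) (l := List.range rn.toNat)
      simpa using this
    have hne : (List.range rn.toNat).countP Q ≠ rn.toNat := by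
      intro heq
      have : ∀ a ∈ List.range rn.toNat, Q a = true :=
        List.countP_eq_length.mp (by rw [heq, List.length_range])
      have := this j (List.mem_range.mpr hj)
      rw [hQ] at this
      exact Bool.false_ne_true this
    omega

lemma range_eq (rn : Int) :
    PySem.List.pyRange 0 rn 1 = (List.range rn.toNat).map (fun k : Nat => (k : Int)) := by
  rw [PySem.List.pyRange_one]
  simp

lemma foldl_toList {α β : Type} (l : List β) (f : Array α → β → Array α)
    (g : List α → β → List α) (h : ∀ a b, (f a b).toList = g a.toList b) (init : Array α) :
    (l.foldl f init).toList = l.foldl g init.toList := by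
  induction l generalizing init with
  | nil => rfl
  | cons x xs ih => simp only [List.foldl_cons, ih, h]

lemma getD_toArray (xs : List Char) (k : Nat) (d : Char) :
    xs.toArray.getD k d = xs.getD k d := by
  simp [Array.getD, List.getD_eq_getElem?_getD]
  split <;> simp_all

lemma A_eq (iset_ids : List Int) (rule_number : Int) :
    check_contain_semi_valid_rule iset_ids rule_number
      = decide ((iset_ids.foldl (fun fl id =>
            (List.range rule_number.toNat).foldl
              (innerStep (get_oct_iset_id id rule_number)) fl)
            (List.replicate rule_number.toNat 0)).sum < rule_number) := by
  unfold check_contain_semi_valid_rule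
  have houter : ∀ (a : Array Int) (id : Int),
      ((List.range rule_number.toNat).foldl (fun (flags : Array Int) k =>
          if ((get_oct_iset_id id rule_number).toArray).getD k ' ' = '4'
          then flags.setIfInBounds k 1 else flags) a).toList
        = (List.range rule_number.toNat).foldl
            (innerStep (get_oct_iset_id id rule_number)) a.toList := by
    intro a id
    apply foldl_toList
    intro fl k
    rw [getD_toArray]
    by_cases h4 : (get_oct_iset_id id rule_number).getD k ' ' = '4'
    · rw [if_pos h4, innerStep,
        if_pos (by simp only [hit4, beq_iff_eq]; exact h4), Array.toList_setIfInBounds]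
    · rw [if_neg h4, innerStep, if_neg (by simp only [hit4, beq_iff_eq]; exact h4)]
  dsimp only
  rw [← Array.foldl_toList]
  rw [foldl_toList _ _ (fun (fl : List Int) (id : Int) =>
        (List.range rule_number.toNat).foldl
          (innerStep (get_oct_iset_id id rule_number)) fl) houter,
      Array.toList_replicate, List.sum_eq_foldl]

lemma main_eq (iset_ids : List Int) (rule_number : Int) :
    check_contain_semi_valid_rule iset_ids rule_number
      = check_contain_semi_valid_rule_alt iset_ids rule_number := by
  rw [A_eq]
  simp only [check_contain_semi_valid_rule_alt, range_eq, List.any_map, List.all_map]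
  rw [outer_eq]
  have hrep : (List.replicate rule_number.toNat (0 : Int)).mapIdx (fun j v =>
        if (iset_ids.any (fun id =>
              decide (j < rule_number.toNat) && hit4 (get_oct_iset_id id rule_number) j)) = true
        then 1 else v)
      = (List.range rule_number.toNat).map (fun j =>
          if (iset_ids.any (fun id =>
                decide (j < rule_number.toNat) && hit4 (get_oct_iset_id id rule_number) j)) = true
          then (1 : Int) else 0) := by
    apply List.ext_getElem
    · simp
    · intro j h1 h2
      simp
  rw [hrep, Bool.eq_iff_iff, decide_eq_true_iff, sum_flags]
  rw [List.any_eq_true]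
  constructor
  · rintro ⟨j, hj, hQ⟩
    refine ⟨j, List.mem_range.mpr hj, ?_⟩
    simp only [Function.comp_apply, List.all_eq_true, Function.comp_apply,
      PySem.List.pyGetD_natCast, decide_eq_true_eq]
    intro id hid
    have := List.any_eq_false.mp hQ id hid
    intro h4
    apply this
    rw [Bool.and_eq_true]
    rw [show hit4 (get_oct_iset_id id rule_number) j
          = ((get_oct_iset_id id rule_number).getD j ' ' == '4') from rfl, beq_iff_eq]
    rw [List.getD_eq_getElem?_getD] at h4
    simp [List.getD_eq_getElem?_getD]
    exact ⟨by omega, h4⟩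
  · rintro ⟨j, hj, hall⟩
    refine ⟨j, List.mem_range.mp hj, ?_⟩
    simp only [Function.comp_apply, List.all_eq_true, Function.comp_apply,
      PySem.List.pyGetD_natCast, decide_eq_true_eq] at hall
    rw [List.any_eq_false]
    intro id hid
    have := hall id hid
    rw [Bool.and_eq_true]
    rintro ⟨-, h4⟩
    rw [show hit4 (get_oct_iset_id id rule_number) j
          = ((get_oct_iset_id id rule_number).getD j ' ' == '4') from rfl, beq_iff_eq] at h4
    exact this (by simpa [List.getD_eq_getElem?_getD] using h4)

-- ===== VERDICT (by name: the statement is the Claim_ definition above) =====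
theorem check_contain_semi_valid_rule_spec : Claim_equal_check_contain_semi_valid_rule := by
  intro iset_ids rule_number _
  unfold Spec_check_contain_semi_valid_rule
  exact main_eq iset_ids rule_number
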